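-- pv_equiv track=rewrite | github.com/farqlia/ScriptLanguages | challenges/chal3.py | solution
-- ===== SOURCE A (Python) =====
-- def solution(S):
--
--     # Skip trailing zeros
--     while S[0] == '0':
--         S = S[1:]
--
--     i = 0
--     while len(S) > 1:
--         if S[-1] == '0':
--             i += 1
--         else:
--             i += 2
--         S = S[:-1]
--
--     # the subtraction of 1
--     return i + 1
-- ===== SOURCE B (Python) =====
-- def solution(S):
--     i = 0
--     while S[i] == '0':      # raises IndexError on empty / all-'0' input, like A
--         i += 1
--     rest = S[i + 1:]
--     return 1 + len(rest) + sum(1 for c in rest if c != '0')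
-- ===== Notes on version B (the rewrite author's own statement) =====
-- stated objective: faster
-- what changed: Replaces A's two quadratic slicing loops (repeated S[1:] and S[:-1]) with an index scan to the first nonzero plus a single linear pass summing 1 for '0' and 2 for any other character after it.
import Mathlib
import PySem

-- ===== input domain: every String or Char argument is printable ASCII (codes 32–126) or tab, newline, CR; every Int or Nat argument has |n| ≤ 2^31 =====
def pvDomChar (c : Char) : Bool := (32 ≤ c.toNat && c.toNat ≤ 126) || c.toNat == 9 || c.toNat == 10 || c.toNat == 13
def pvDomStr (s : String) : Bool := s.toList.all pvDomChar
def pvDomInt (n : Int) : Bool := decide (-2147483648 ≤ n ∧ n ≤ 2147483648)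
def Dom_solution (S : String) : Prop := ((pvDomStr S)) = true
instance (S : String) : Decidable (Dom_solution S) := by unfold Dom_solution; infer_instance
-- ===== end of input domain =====

-- B replaces A's two quadratic slicing loops by one index scan to the first nonzero
-- and a single linear pass (asymptotically faster). Both raise IndexError on
-- empty / all-'0' input; those inputs are outside Pre_solution.

-- ===== PORT A =====
-- `while S[0] == '0': S = S[1:]` ; on an all-'0' or empty string the Python raises
-- IndexError (excluded by Pre_solution); there the port returns [].
def solutionStrip : List Char → List Char
  | [] => []
  | c :: rest => if c = '0' then solutionStrip rest else c :: rest

-- `while len(S) > 1: i += 1 or 2 depending on S[-1]; S = S[:-1]`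
def solutionLoop (S : List Char) (i : Int) : Int :=
  if h : S.length > 1 then
    solutionLoop S.dropLast (if S.getLast? = some '0' then i + 1 else i + 2)
  else i
termination_by S.length
decreasing_by simp only [List.length_dropLast]; omega

def solution (S : String) : Int :=
  solutionLoop (solutionStrip S.toList) 0 + 1

-- ===== PORT B =====
-- `i = 0; while S[i] == '0': i += 1` — index of the first non-'0' character;
-- on all-'0'/empty input the Python raises IndexError (outside Pre_solution),
-- the port returns the length there.
def solutionAltSkip : List Char → Nat → Nat
  | [], i => i
  | c :: rest, i => if c = '0' then solutionAltSkip rest (i + 1) else i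

-- rest = S[i+1:]; return 1 + len(rest) + sum(1 for c in rest if c != '0')
def solution_alt (S : String) : Int :=
  1 + ((S.toList.drop (solutionAltSkip S.toList 0 + 1)).length : Int)
    + (((S.toList.drop (solutionAltSkip S.toList 0 + 1)).filter (fun c => c ≠ '0')).length : Int)

-- ===== PRECONDITION & SPEC =====
-- Excludes exactly the inputs where A raises IndexError: strings whose characters are all '0' (incl. empty); B raises IndexError there as well.
def solutionPreCheck (S : String) : Bool := S.toList.any (fun c => c != '0')
def Pre_solution (S : String) : Prop := solutionPreCheck S = true
instance (S : String) : Decidable (Pre_solution S) := by unfold Pre_solution; infer_instance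
def pvWitness_solution : String := "10"

def Spec_solution (S : String) (out : Int) : Prop := out = solution_alt S
instance (S : String) (out : Int) : Decidable (Spec_solution S out) := by unfold Spec_solution; infer_instance

-- ===== CLAIM (what is proved, stated in full; the proofs are below) =====
def Claim_equal_solution : Prop := ∀ (S : String), Dom_solution S → Pre_solution S → Spec_solution S (solution S)

-- ===== LEMMAS AND PROOFS =====

-- per-character weight and its sum
def solW (l : List Char) : Int := (l.map (fun c => if c = '0' then (1 : Int) else 2)).sum

theorem solW_append (l m : List Char) : solW (l ++ m) = solW l + solW m := by
  simp [solW]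

theorem solutionStrip_eq_dropWhile (l : List Char) :
    solutionStrip l = l.dropWhile (fun c => c = '0') := by
  induction l with
  | nil => rfl
  | cons c rest ih =>
    by_cases h : c = '0' <;> simp [solutionStrip, List.dropWhile, h, ih]

theorem solutionAltSkip_shift (l : List Char) : ∀ (i : Nat),
    solutionAltSkip l i = solutionAltSkip l 0 + i := by
  induction l with
  | nil => intro i; simp [solutionAltSkip]
  | cons c rest ih =>
    intro i
    by_cases h : c = '0'
    · simp only [solutionAltSkip, if_pos h]
      rw [ih (i + 1), ih 1]; omega
    · simp [solutionAltSkip, h]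

theorem drop_skip_eq_dropWhile (l : List Char) :
    l.drop (solutionAltSkip l 0 + 1) = (l.dropWhile (fun c => c = '0')).drop 1 := by
  induction l with
  | nil => simp
  | cons c rest ih =>
    by_cases h : c = '0'
    · simp only [solutionAltSkip, if_pos h]
      rw [solutionAltSkip_shift rest 1]
      have : solutionAltSkip rest 0 + 1 + 1 = (solutionAltSkip rest 0 + 1) + 1 := by omega
      rw [this, List.drop_succ_cons, ih, List.dropWhile]
      simp [h]
    · simp [solutionAltSkip, h, List.dropWhile]

theorem solutionLoop_eq (m : List Char) : ∀ (a : Char) (i : Int),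
    solutionLoop (a :: m) i = i + solW m := by
  induction m using List.reverseRecOn with
  | nil => intro a i; rw [solutionLoop]; simp [solW]
  | append_singleton t b ih =>
    intro a i
    rw [solutionLoop]
    simp only [show a :: (t ++ [b]) = (a :: t) ++ [b] from rfl,
      List.dropLast_concat, List.getLast?_concat]
    rw [dif_pos (by simp), solW_append]
    by_cases h0 : b = '0'
    · rw [if_pos (by simp [h0]), ih]
      simp [h0, solW]; ring
    · rw [if_neg (by simp [h0]), ih]
      simp [h0, solW]; ring

theorem solW_eq (l : List Char) :
    solW l = (l.length : Int) + ((l.filter (fun c => c ≠ '0')).length : Int) := by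
  induction l with
  | nil => simp [solW]
  | cons c t ih =>
    by_cases h : c = '0' <;> simp [solW, List.filter, h] at * <;> rw [ih] <;> ring

-- ===== VERDICT (by name: the statement is the Claim_ definition above) =====
theorem solution_spec : Claim_equal_solution := by
  intro S _ hpre
  unfold Spec_solution solution solution_alt
  rw [solutionStrip_eq_dropWhile]
  rw [drop_skip_eq_dropWhile]
  have hex : ∃ c ∈ S.toList, c ≠ '0' := by
    simpa [Pre_solution, solutionPreCheck, List.any_eq_true] using hpre
  obtain ⟨c, hc, hc0⟩ := hex
  have hne : S.toList.dropWhile (fun c => c = '0') ≠ [] := by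
    intro h
    have := List.dropWhile_eq_nil_iff.mp h
    exact hc0 (by simpa using this c hc)
  obtain ⟨a, m, hm⟩ := List.exists_cons_of_ne_nil hne
  rw [hm]
  rw [solutionLoop_eq m a 0]
  simp [solW_eq]
  ring
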